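-- pv_equiv track=rewrite | github.com/symetryml/o11y | otel_etl/utils/name_sanitizer.py | extract_metric_family
-- ===== SOURCE A (Python) =====
-- def extract_metric_family(metric_name: str) -> str:
--     """Extract the base metric family from a metric name.
--
--     Strips suffixes like _total, _bucket, _sum, _count, _info, _created.
--
--     Args:
--         metric_name: Full metric name
--
--     Returns:
--         Base metric family name
--     """
--     suffixes = ["_total", "_bucket", "_sum", "_count", "_info", "_created"]
--
--     result = metric_name
--     for suffix in suffixes:
--         if result.endswith(suffix):
--             result = result[: -len(suffix)]
--             break
--
--     return result
-- ===== SOURCE B (Python) =====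
-- def extract_metric_family(metric_name: str) -> str:
--     """Single rfind on '_' plus a set-style membership test on the tail,
--     instead of trying each known suffix with endswith."""
--     i = metric_name.rfind("_")
--     if i >= 0 and metric_name[i + 1:] in ("total", "bucket", "sum", "count", "info", "created"):
--         return metric_name[:i]
--     return metric_name
-- ===== Notes on version B (the rewrite author's own statement) =====
-- stated objective: alternative
-- what changed: Instead of testing the name against each of the six suffixes with endswith in a loop, B locates the last underscore once with rfind and checks the tail after it against the set of known suffix words, stripping from that underscore.
import Mathlib
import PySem

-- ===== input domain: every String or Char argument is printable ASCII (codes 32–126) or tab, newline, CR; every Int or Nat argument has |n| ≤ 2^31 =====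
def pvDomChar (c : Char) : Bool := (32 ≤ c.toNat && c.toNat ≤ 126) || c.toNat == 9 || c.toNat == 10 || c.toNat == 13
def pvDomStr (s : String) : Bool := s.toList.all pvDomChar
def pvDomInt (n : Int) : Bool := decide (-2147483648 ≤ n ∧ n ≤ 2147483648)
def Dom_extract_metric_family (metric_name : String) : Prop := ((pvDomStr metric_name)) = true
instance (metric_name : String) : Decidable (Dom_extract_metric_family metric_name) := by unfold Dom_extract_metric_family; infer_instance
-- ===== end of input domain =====

-- B replaces A's loop of endswith tests by one rfind for the last '_' plus a membership
-- test of the tail against the six suffix words (objective: alternative, same cost).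

-- ===== PORT A =====
def pvSuffixes : List String := ["_total", "_bucket", "_sum", "_count", "_info", "_created"]

-- the 'for suffix in suffixes: if result.endswith(suffix): result = result[:-len(suffix)]; break'
def pvLoopA (result : String) : List String → String
  | [] => result
  | s :: rest =>
      if PySem.Str.endswith result s then
        PySem.Str.slice result none (some (-(PySem.Str.len s)))
      else pvLoopA result rest

def extract_metric_family (metric_name : String) : String :=
  pvLoopA metric_name pvSuffixes

-- ===== PORT B =====
def pvTails : List String := ["total", "bucket", "sum", "count", "info", "created"]

def extract_metric_family_alt (metric_name : String) : String :=
  let i := PySem.Str.rfind metric_name "_"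
  if 0 ≤ i ∧ pvTails.contains (PySem.Str.slice metric_name (some (i + 1)) none) then
    PySem.Str.slice metric_name none (some i)
  else metric_name

-- ===== PRECONDITION & SPEC =====
def Spec_extract_metric_family (metric_name : String) (out : String) : Prop := out = extract_metric_family_alt metric_name
instance (metric_name : String) (out : String) : Decidable (Spec_extract_metric_family metric_name out) := by unfold Spec_extract_metric_family; infer_instance

-- ===== CLAIM (what is proved, stated in full; the proofs are below) =====
def Claim_equal_extract_metric_family : Prop := ∀ (metric_name : String), Dom_extract_metric_family metric_name → Spec_extract_metric_family metric_name (extract_metric_family metric_name)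

-- ===== LEMMAS AND PROOFS =====

-- specification of rfind's worker: it returns the HIGHEST i ≤ k where sub is a prefix of s.drop i, else -1
lemma pv_go_spec (s sub : List Char) (k : Nat) :
    (PySem.Chars.rfind.go s sub k = -1 ∧ ∀ i, i ≤ k → ¬ sub <+: s.drop i) ∨
    (∃ n : Nat, PySem.Chars.rfind.go s sub k = (n : Int) ∧ n ≤ k ∧ sub <+: s.drop n ∧
       ∀ i, n < i → i ≤ k → ¬ sub <+: s.drop i) := by
  induction k with
  | zero =>
      by_cases h : sub.isPrefixOf s
      · exact Or.inr ⟨0, by simp [PySem.Chars.rfind.go, h], le_refl _, by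
          simpa [List.isPrefixOf_iff_prefix] using h, by omega⟩
      · refine Or.inl ⟨by simp [PySem.Chars.rfind.go, h], ?_⟩
        intro i hi
        interval_cases i
        simpa [List.isPrefixOf_iff_prefix] using h
  | succ j ih =>
      by_cases h : sub.isPrefixOf (s.drop (j + 1))
      · exact Or.inr ⟨j + 1, by simp [PySem.Chars.rfind.go, h], le_refl _, by
          simpa [List.isPrefixOf_iff_prefix] using h, by omega⟩
      · have hgo : PySem.Chars.rfind.go s sub (j + 1) = PySem.Chars.rfind.go s sub j := by
          simp [PySem.Chars.rfind.go, h]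
        have hnot : ¬ sub <+: s.drop (j + 1) := by
          simpa [List.isPrefixOf_iff_prefix] using h
        rcases ih with ⟨h1, h2⟩ | ⟨n, h1, h2, h3, h4⟩
        · refine Or.inl ⟨hgo ▸ h1, ?_⟩
          intro i hi
          rcases Nat.lt_or_ge i (j + 1) with hlt | hge
          · exact h2 i (by omega)
          · have : i = j + 1 := by omega
            exact this ▸ hnot
        · refine Or.inr ⟨n, hgo ▸ h1, by omega, h3, ?_⟩
          intro i hlt hle
          rcases Nat.lt_or_ge i (j + 1) with hl | hg
          · exact h4 i hlt (by omega)
          · have : i = j + 1 := by omega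
            exact this ▸ hnot

-- a nonempty prefix forces the index to be within the list
lemma pv_prefix_drop_lt (s sub : List Char) (hsub : sub ≠ []) {i : Nat}
    (h : sub <+: s.drop i) : i < s.length := by
  by_contra hge
  have : s.drop i = [] := List.drop_eq_nil_of_le (by omega)
  rw [this] at h
  exact hsub (List.prefix_nil.mp h)

-- the two shapes of rfind, with full maximality (no bound on i)
lemma pv_rfind_cases (s sub : List Char) (hsub : sub ≠ []) :
    (PySem.Chars.rfind s sub = -1 ∧ ∀ i, ¬ sub <+: s.drop i) ∨
    (∃ n : Nat, PySem.Chars.rfind s sub = (n : Int) ∧ sub <+: s.drop n ∧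
       ∀ i, n < i → ¬ sub <+: s.drop i) := by
  rcases pv_go_spec s sub s.length with ⟨h1, h2⟩ | ⟨n, h1, _, h3, h4⟩
  · refine Or.inl ⟨h1, fun i hi => ?_⟩
    exact h2 i (le_of_lt (pv_prefix_drop_lt s sub hsub hi)) hi
  · refine Or.inr ⟨n, h1, h3, fun i hlt hi => ?_⟩
    exact h4 i hlt (le_of_lt (pv_prefix_drop_lt s sub hsub hi)) hi

-- with n the position of the LAST '_', ending with '_'::t (t underscore-free) says exactly
-- that t is what follows position n
lemma pv_endswith_char (cs t : List Char) (n : Nat)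
    (hpre : ['_'] <+: cs.drop n) (hmax : ∀ i, n < i → ¬ ['_'] <+: cs.drop i)
    (ht : '_' ∉ t) : ('_' :: t) <:+ cs ↔ cs.drop (n + 1) = t := by
  have hdropn : cs.drop n = '_' :: cs.drop (n + 1) := by
    rcases hpre with ⟨r, hr⟩
    have htl : (cs.drop n).tail = cs.drop (n + 1) := by
      rw [← List.drop_drop]; simp
    rw [← hr] at htl ⊢
    simp at htl
    simp [htl]
  constructor
  · intro hsuf
    have hlen : ('_' :: t).length ≤ cs.length := hsuf.length_le
    set m : Nat := cs.length - (t.length + 1) with hm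
    have hdm : cs.drop m = '_' :: t := by
      have := List.suffix_iff_eq_drop.mp hsuf
      rw [this]
      congr 1
    have hpm : ['_'] <+: cs.drop m := by rw [hdm]; exact ⟨t, rfl⟩
    have hmn : m ≤ n := by
      by_contra hc
      exact hmax m (by omega) hpm
    have hnm : n = m := by
      by_contra hne
      -- n > m: position n lies inside t, so t would contain '_'
      have hlt : m < n := by omega
      have hdn : cs.drop n = t.drop (n - m - 1) := by
        have : cs.drop n = (cs.drop m).drop (n - m) := by
          rw [List.drop_drop]; congr 1; omega
        rw [this, hdm]
        have : n - m = (n - m - 1) + 1 := by omega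
        rw [this]
        simp
      rcases hpre with ⟨r, hr⟩
      have : '_' ∈ t := by
        have hmem : '_' ∈ t.drop (n - m - 1) := by
          rw [← hdn, ← hr]; simp
        exact List.mem_of_mem_drop hmem
      exact ht this
    rw [hnm] at hdropn
    rw [hdm] at hdropn
    -- hdropn : '_' :: t = '_' :: cs.drop (m + 1)
    rw [hnm]
    simpa using hdropn.symm
  · intro hdrop
    have : '_' :: t = cs.drop n := by rw [hdropn, hdrop]
    rw [this]
    exact List.drop_suffix n cs

-- length bookkeeping: if what follows position n is t, stripping '_'::t is taking n
lemma pv_take_eq (cs t : List Char) (n : Nat)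
    (hpre : ['_'] <+: cs.drop n) (hdrop : cs.drop (n + 1) = t) :
    cs.length - (t.length + 1) = n := by
  have hlt : n < cs.length := pv_prefix_drop_lt cs ['_'] (by simp) hpre
  have : cs.length - (n + 1) = t.length := by rw [← hdrop]; simp
  omega

-- evaluate B's branch condition and result once the rfind value is known
lemma pv_alt_eq (m : String) (n : Nat) (h : PySem.Str.rfind m "_" = (n : Int)) :
    extract_metric_family_alt m =
      (if pvTails.contains (String.ofList (m.toList.drop (n + 1))) then
        String.ofList (m.toList.take n) else m) := by
  have h1 : PySem.Str.slice m (some ((n : Int) + 1)) none = String.ofList (m.toList.drop (n + 1)) := by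
    simp only [PySem.Str.slice, PySem.Chars.slice]
    rw [show ((n : Int) + 1) = ((n + 1 : Nat) : Int) by push_cast; ring,
        PySem.List.slice_from _ (by positivity)]
    simp
  have h2 : PySem.Str.slice m none (some (n : Int)) = String.ofList (m.toList.take n) := by
    simp only [PySem.Str.slice, PySem.Chars.slice]
    rw [PySem.List.slice_to _ (by positivity)]
    simp
  unfold extract_metric_family_alt
  rw [h]
  show (if 0 ≤ (n : Int) ∧ pvTails.contains (PySem.Str.slice m (some ((n : Int) + 1)) none) = true
      then PySem.Str.slice m none (some (n : Int)) else m) = _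
  rw [h1, h2]
  simp

-- contains on pvTails, read as six list equalities
lemma pv_contains_iff (l : List Char) :
    pvTails.contains (String.ofList l) = true ↔
      (l = "total".toList ∨ l = "bucket".toList ∨ l = "sum".toList ∨
       l = "count".toList ∨ l = "info".toList ∨ l = "created".toList) := by
  have hof : ∀ t : String, (String.ofList l = t) ↔ l = t.toList := by
    intro t
    constructor
    · intro h; have := congrArg String.toList h; simpa using this
    · intro h; subst h; exact String.ofList_toList
  rw [List.contains_iff_mem]
  simp only [pvTails, List.mem_cons, List.not_mem_nil, or_false]
  rw [hof, hof, hof, hof, hof, hof]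

-- A's slice result[:-len(suffix)] as a take
-- result[:-k] for the literal suffix lengths, as a take
lemma pv_s4 (m : String) :
    PySem.Str.slice m none (some (-4)) = String.ofList (m.toList.take (m.toList.length - 4)) := by
  show String.ofList (PySem.List.slice m.toList none (some (-4))) = _
  rw [PySem.List.slice_to_neg_ofNat m.toList 4 (by omega)]
lemma pv_s5 (m : String) :
    PySem.Str.slice m none (some (-5)) = String.ofList (m.toList.take (m.toList.length - 5)) := by
  show String.ofList (PySem.List.slice m.toList none (some (-5))) = _
  rw [PySem.List.slice_to_neg_ofNat m.toList 5 (by omega)]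
lemma pv_s6 (m : String) :
    PySem.Str.slice m none (some (-6)) = String.ofList (m.toList.take (m.toList.length - 6)) := by
  show String.ofList (PySem.List.slice m.toList none (some (-6))) = _
  rw [PySem.List.slice_to_neg_ofNat m.toList 6 (by omega)]
lemma pv_s7 (m : String) :
    PySem.Str.slice m none (some (-7)) = String.ofList (m.toList.take (m.toList.length - 7)) := by
  show String.ofList (PySem.List.slice m.toList none (some (-7))) = _
  rw [PySem.List.slice_to_neg_ofNat m.toList 7 (by omega)]
lemma pv_s8 (m : String) :
    PySem.Str.slice m none (some (-8)) = String.ofList (m.toList.take (m.toList.length - 8)) := by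
  show String.ofList (PySem.List.slice m.toList none (some (-8))) = _
  rw [PySem.List.slice_to_neg_ofNat m.toList 8 (by omega)]

-- ===== VERDICT (by name: the statement is the Claim_ definition above) =====
theorem extract_metric_family_spec : Claim_equal_extract_metric_family := by
  intro m _
  unfold Spec_extract_metric_family
  rcases pv_rfind_cases m.toList ['_'] (by simp) with ⟨h1, h2⟩ | ⟨n, h1, h2, h3⟩
  · -- no '_' anywhere: neither side strips
    have hends : ∀ t : List Char, '_' ∈ t → PySem.Chars.endswith m.toList t = false := by
      intro t hm
      rw [← Bool.not_eq_true]
      intro hcon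
      have hsuf : t <:+ m.toList := (PySem.Chars.endswith_iff _ _).mp hcon
      rcases hsuf with ⟨r, hr⟩
      rcases List.mem_iff_append.mp hm with ⟨u, v, huv⟩
      have : ['_'] <+: m.toList.drop (r.length + u.length) := by
        rw [← hr, huv, show r ++ (u ++ '_' :: v) = (r ++ u) ++ '_' :: v by simp,
          show r.length + u.length = (r ++ u).length by simp, List.drop_left]
        exact ⟨v, rfl⟩
      exact h2 _ this
    have haltrfind : PySem.Str.rfind m "_" = -1 := by
      simp [PySem.Str.rfind]
      exact h1
    unfold extract_metric_family extract_metric_family_alt pvSuffixes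
    rw [haltrfind]
    simp [pvLoopA, hends ['_', 't', 'o', 't', 'a', 'l'] (by decide), hends ['_', 'b', 'u', 'c', 'k', 'e', 't'] (by decide),
      hends ['_', 's', 'u', 'm'] (by decide), hends ['_', 'c', 'o', 'u', 'n', 't'] (by decide),
      hends ['_', 'i', 'n', 'f', 'o'] (by decide), hends ['_', 'c', 'r', 'e', 'a', 't', 'e', 'd'] (by decide)]
  · -- the last '_' sits at position n
    have hrfindm : PySem.Str.rfind m "_" = (n : Int) := by
      simp [PySem.Str.rfind]; exact h1
    rw [pv_alt_eq m n hrfindm]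
    have hend : ∀ (t : List Char), '_' ∉ t →
        (PySem.Chars.endswith m.toList ('_' :: t) = true ↔ m.toList.drop (n + 1) = t) := by
      intro t ht
      rw [PySem.Chars.endswith_iff]
      exact pv_endswith_char m.toList t n h2 h3 ht
    unfold extract_metric_family pvSuffixes
    by_cases c1 : m.toList.drop (n + 1) = ['t', 'o', 't', 'a', 'l']
    · have hn := pv_take_eq m.toList ['t', 'o', 't', 'a', 'l'] n h2 c1
      simp [pvLoopA,
        (hend ['t', 'o', 't', 'a', 'l'] (by decide)).mpr c1,
        pv_s6, c1]
      congr 1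
      simp at hn ⊢
      omega
    · by_cases c2 : m.toList.drop (n + 1) = ['b', 'u', 'c', 'k', 'e', 't']
      · have hn := pv_take_eq m.toList ['b', 'u', 'c', 'k', 'e', 't'] n h2 c2
        simp [pvLoopA,
          (hend ['t', 'o', 't', 'a', 'l'] (by decide)),
          (hend ['b', 'u', 'c', 'k', 'e', 't'] (by decide)).mpr c2,
          pv_s7, c2]
        congr 1
        simp at hn ⊢
        omega
      · by_cases c3 : m.toList.drop (n + 1) = ['s', 'u', 'm']
        · have hn := pv_take_eq m.toList ['s', 'u', 'm'] n h2 c3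
          simp [pvLoopA,
            (hend ['t', 'o', 't', 'a', 'l'] (by decide)),
            (hend ['b', 'u', 'c', 'k', 'e', 't'] (by decide)),
            (hend ['s', 'u', 'm'] (by decide)).mpr c3,
            pv_s4, c3]
          congr 1
          simp at hn ⊢
          omega
        · by_cases c4 : m.toList.drop (n + 1) = ['c', 'o', 'u', 'n', 't']
          · have hn := pv_take_eq m.toList ['c', 'o', 'u', 'n', 't'] n h2 c4
            simp [pvLoopA,
              (hend ['t', 'o', 't', 'a', 'l'] (by decide)),
              (hend ['b', 'u', 'c', 'k', 'e', 't'] (by decide)),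
              (hend ['s', 'u', 'm'] (by decide)),
              (hend ['c', 'o', 'u', 'n', 't'] (by decide)).mpr c4,
              pv_s6, c4]
            congr 1
            simp at hn ⊢
            omega
          · by_cases c5 : m.toList.drop (n + 1) = ['i', 'n', 'f', 'o']
            · have hn := pv_take_eq m.toList ['i', 'n', 'f', 'o'] n h2 c5
              simp [pvLoopA,
                (hend ['t', 'o', 't', 'a', 'l'] (by decide)),
                (hend ['b', 'u', 'c', 'k', 'e', 't'] (by decide)),
                (hend ['s', 'u', 'm'] (by decide)),
                (hend ['c', 'o', 'u', 'n', 't'] (by decide)),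
                (hend ['i', 'n', 'f', 'o'] (by decide)).mpr c5,
                pv_s5, c5]
              congr 1
              simp at hn ⊢
              omega
            · by_cases c6 : m.toList.drop (n + 1) = ['c', 'r', 'e', 'a', 't', 'e', 'd']
              · have hn := pv_take_eq m.toList ['c', 'r', 'e', 'a', 't', 'e', 'd'] n h2 c6
                simp [pvLoopA,
                  (hend ['t', 'o', 't', 'a', 'l'] (by decide)),
                  (hend ['b', 'u', 'c', 'k', 'e', 't'] (by decide)),
                  (hend ['s', 'u', 'm'] (by decide)),
                  (hend ['c', 'o', 'u', 'n', 't'] (by decide)),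
                  (hend ['i', 'n', 'f', 'o'] (by decide)),
                  (hend ['c', 'r', 'e', 'a', 't', 'e', 'd'] (by decide)).mpr c6,
                  pv_s8, c6]
                congr 1
                simp at hn ⊢
                omega
              · simp [pvLoopA,
                  (hend ['t', 'o', 't', 'a', 'l'] (by decide)),
                  (hend ['b', 'u', 'c', 'k', 'e', 't'] (by decide)),
                  (hend ['s', 'u', 'm'] (by decide)),
                  (hend ['c', 'o', 'u', 'n', 't'] (by decide)),
                  (hend ['i', 'n', 'f', 'o'] (by decide)),
                  (hend ['c', 'r', 'e', 'a', 't', 'e', 'd'] (by decide)),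
                  c1, c2, c3, c4, c5, c6]
                intro hmem
                exact absurd ((pv_contains_iff _).mp (List.contains_iff_mem.mpr hmem))
                  (by simp [c1, c2, c3, c4, c5, c6])
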